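-- pv_equiv track=rewrite | github.com/AharonSambol/AdventOfCode | 2025/pythonSolutions/day09.py | valid_rectangle
-- ===== SOURCE A (Python) =====
-- def valid_rectangle(point: tuple[int, int], other_point: tuple[int, int], outside_border: set[tuple[int, int]]) -> bool:
--     for c in range(min(point[1], other_point[1]), max(point[1], other_point[1])):
--         for r in [point[0], other_point[0]]:
--             if (r, c) in outside_border:
--                 return False
--     for r in range(min(point[0], other_point[0]), max(point[0], other_point[0])):
--         for c in [point[1], other_point[1]]:
--             if (r, c) in outside_border:
--                 return False
--     return True
-- ===== SOURCE B (Python) =====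
-- def valid_rectangle(point: tuple[int, int], other_point: tuple[int, int], outside_border: set[tuple[int, int]]) -> bool:
--     rows = {point[0], other_point[0]}
--     cols = {point[1], other_point[1]}
--     lo_c, hi_c = min(point[1], other_point[1]), max(point[1], other_point[1])
--     lo_r, hi_r = min(point[0], other_point[0]), max(point[0], other_point[0])
--     for r, c in outside_border:
--         if (r in rows and lo_c <= c < hi_c) or (c in cols and lo_r <= r < hi_r):
--             return False
--     return True
-- ===== Notes on version B (the rewrite author's own statement) =====
-- stated objective: faster
-- what changed: Instead of walking every perimeter cell of the rectangle and testing membership in outside_border, B iterates once over outside_border and checks each point against the two row/column bands with closed-form bounds.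
import Mathlib
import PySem

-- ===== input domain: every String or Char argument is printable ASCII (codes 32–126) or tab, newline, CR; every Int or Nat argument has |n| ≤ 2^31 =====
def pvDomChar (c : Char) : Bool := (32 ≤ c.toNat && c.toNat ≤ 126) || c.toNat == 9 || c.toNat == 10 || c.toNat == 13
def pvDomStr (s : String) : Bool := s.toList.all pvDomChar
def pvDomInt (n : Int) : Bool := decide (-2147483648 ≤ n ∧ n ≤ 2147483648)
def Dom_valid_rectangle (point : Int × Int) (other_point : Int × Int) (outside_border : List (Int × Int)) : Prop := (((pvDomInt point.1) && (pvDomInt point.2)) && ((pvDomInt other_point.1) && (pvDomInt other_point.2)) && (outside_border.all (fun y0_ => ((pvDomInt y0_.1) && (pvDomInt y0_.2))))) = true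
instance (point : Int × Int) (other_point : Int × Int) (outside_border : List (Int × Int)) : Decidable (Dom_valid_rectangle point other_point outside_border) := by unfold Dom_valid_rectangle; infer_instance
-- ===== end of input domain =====

-- B inverts the traversal: it scans outside_border once and tests each point against the
-- rectangle's two row/column bands (closed-form bounds), instead of walking every perimeter cell.

-- ===== PORT A =====
def valid_rectangle (point : Int × Int) (other_point : Int × Int) (outside_border : List (Int × Int)) : Bool :=
  -- first loop: columns of the two horizontal edges (early return False = .any)
  if (PySem.List.pyRange (min point.2 other_point.2) (max point.2 other_point.2) 1).any
       (fun c => [point.1, other_point.1].any (fun r => outside_border.contains (r, c))) then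
    false
  -- second loop: rows of the two vertical edges
  else if (PySem.List.pyRange (min point.1 other_point.1) (max point.1 other_point.1) 1).any
       (fun r => [point.2, other_point.2].any (fun c => outside_border.contains (r, c))) then
    false
  else
    true

-- ===== PORT B =====
def valid_rectangle_alt (point : Int × Int) (other_point : Int × Int) (outside_border : List (Int × Int)) : Bool :=
  -- single pass over outside_border; return False on the first hit
  !(outside_border.any (fun rc =>
      ((rc.1 == point.1 || rc.1 == other_point.1)
        && decide (min point.2 other_point.2 ≤ rc.2) && decide (rc.2 < max point.2 other_point.2))
      ||
      ((rc.2 == point.2 || rc.2 == other_point.2)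
        && decide (min point.1 other_point.1 ≤ rc.1) && decide (rc.1 < max point.1 other_point.1))))

-- ===== PRECONDITION & SPEC =====
def Spec_valid_rectangle (point : Int × Int) (other_point : Int × Int) (outside_border : List (Int × Int)) (out : Bool) : Prop := out = valid_rectangle_alt point other_point outside_border
instance (point : Int × Int) (other_point : Int × Int) (outside_border : List (Int × Int)) (out : Bool) : Decidable (Spec_valid_rectangle point other_point outside_border out) := by unfold Spec_valid_rectangle; infer_instance

-- ===== CLAIM (what is proved, stated in full; the proofs are below) =====
def Claim_equal_valid_rectangle : Prop := ∀ (point : Int × Int) (other_point : Int × Int) (outside_border : List (Int × Int)), Dom_valid_rectangle point other_point outside_border → Spec_valid_rectangle point other_point outside_border (valid_rectangle point other_point outside_border)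

-- ===== LEMMAS AND PROOFS =====

theorem valid_rectangle_eq_alt (point : Int × Int) (other_point : Int × Int)
    (outside_border : List (Int × Int)) :
    valid_rectangle point other_point outside_border
      = valid_rectangle_alt point other_point outside_border := by
  rcases point with ⟨pr, pc⟩
  rcases other_point with ⟨qr, qc⟩
  -- collapse A's early-return if-chain into a single negated disjunction
  have hA : valid_rectangle (pr, pc) (qr, qc) outside_border
      = !((PySem.List.pyRange (min pc qc) (max pc qc) 1).any
            (fun c => [pr, qr].any (fun r => outside_border.contains (r, c)))
          || (PySem.List.pyRange (min pr qr) (max pr qr) 1).any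
            (fun r => [pc, qc].any (fun c => outside_border.contains (r, c)))) := by
    unfold valid_rectangle
    cases h1 : (PySem.List.pyRange (min pc qc) (max pc qc) 1).any
        (fun c => [pr, qr].any (fun r => outside_border.contains (r, c))) <;>
      cases h2 : (PySem.List.pyRange (min pr qr) (max pr qr) 1).any
        (fun r => [pc, qc].any (fun c => outside_border.contains (r, c))) <;>
      simp
  rw [hA]
  unfold valid_rectangle_alt
  congr 1
  rw [Bool.eq_iff_iff]
  simp only [Bool.or_eq_true, List.any_eq_true, PySem.List.mem_pyRange_one,
    List.contains_eq_mem, List.mem_cons, List.not_mem_nil, or_false,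
    Bool.and_eq_true, beq_iff_eq, decide_eq_true_eq]
  constructor
  · rintro (⟨c, hc, r, hr, hmem⟩ | ⟨r, hrng, c, hc, hmem⟩)
    · exact ⟨(r, c), hmem, Or.inl ⟨⟨hr, hc.1⟩, hc.2⟩⟩
    · exact ⟨(r, c), hmem, Or.inr ⟨⟨hc, hrng.1⟩, hrng.2⟩⟩
  · rintro ⟨⟨r, c⟩, hmem, ⟨⟨hr, hlo⟩, hhi⟩ | ⟨⟨hc, hlo⟩, hhi⟩⟩
    · exact Or.inl ⟨c, ⟨hlo, hhi⟩, r, hr, hmem⟩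
    · exact Or.inr ⟨r, ⟨hlo, hhi⟩, c, hc, hmem⟩

-- ===== VERDICT (by name: the statement is the Claim_ definition above) =====
theorem valid_rectangle_spec : Claim_equal_valid_rectangle := by
  intro point other_point outside_border _
  exact valid_rectangle_eq_alt point other_point outside_border
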